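-- pv_equiv track=rewrite | github.com/saehoon0501/- | 치킨 배달(백준 15686).py | bfs
-- ===== SOURCE A (Python) =====
-- import copy;
-- from collections import deque;
--
-- def bfs(m, chicken, house):
--     queue = deque();
--     queue.append(([], 0));
--     minimum= 0;
--
--     while len(queue) > 0:
--         selected, count = queue.popleft();
--
--         if count == 0:
--             for i in range(len(chicken)-m+1):
--                 selected.append(i);
--                 queue.append((copy.deepcopy(selected), count+1));
--                 selected.pop();
--             continue;
--
--         if count == m:
--             ret = getChickenDistance(selected, chicken, house);
--             if minimum == 0 or ret < minimum:
--                 minimum = ret;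
--             continue;
--
--         for i in range(selected[count-1]+1,len(chicken)):
--             selected.append(i);
--             queue.append((copy.deepcopy(selected), count+1));
--             selected.pop();
--
--     return minimum;
--
-- def getChickenDistance(selected, chicken, house):
--     ret = 0;
--     for h in house:
--         closest = 0;
--         for s in selected:
--             chickPos = chicken[s];
--             tmp = abs(h[0] - chickPos[0]) + abs(h[1] - chickPos[1]);
--             if closest == 0 or tmp < closest:
--                 closest = tmp;
--         ret += closest;
--
--     return ret;
-- ===== SOURCE B (Python) =====
-- def bfs(m, chicken, house):
--     totals = [_total(sel, chicken, house) for sel in _combos(0, m, len(chicken))]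
--     return min(totals, default=0)
--
-- def _combos(start, r, n):
--     # all strictly increasing r-tuples of indices in [start, n), lexicographic
--     if r == 0:
--         return [[]]
--     return [[i] + tail for i in range(start, n) for tail in _combos(i + 1, r - 1, n)]
--
-- def _total(sel, chicken, house):
--     return sum(min(abs(hx - chicken[s][0]) + abs(hy - chicken[s][1]) for s in sel)
--                for hx, hy in house)
-- ===== Notes on version B (the rewrite author's own statement) =====
-- stated objective: simpler
-- what changed: B replaces A's BFS over a deque of partial selections (with deepcopy and count/level bookkeeping) and its 0-as-uninitialized running-minimum idiom by a direct recursive enumeration of the index combinations with plain min/sum; Pre_ excludes m = 0 with a nonempty house list (A returns 0, B's min over the empty selection raises ValueError) and inputs with a house on a chicken store, which the chicken-delivery problem rules out and on which A's 0-sentinel minimum yields accidental values.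
-- outside the precondition, e.g. on bfs(0, [(0, 0)], [(1, 1)]): A returns 0, B raises ValueError; on bfs(2, [(0, 0), (3, 0)], [(0, 0)]): A returns 3, B returns 0
import Mathlib
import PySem

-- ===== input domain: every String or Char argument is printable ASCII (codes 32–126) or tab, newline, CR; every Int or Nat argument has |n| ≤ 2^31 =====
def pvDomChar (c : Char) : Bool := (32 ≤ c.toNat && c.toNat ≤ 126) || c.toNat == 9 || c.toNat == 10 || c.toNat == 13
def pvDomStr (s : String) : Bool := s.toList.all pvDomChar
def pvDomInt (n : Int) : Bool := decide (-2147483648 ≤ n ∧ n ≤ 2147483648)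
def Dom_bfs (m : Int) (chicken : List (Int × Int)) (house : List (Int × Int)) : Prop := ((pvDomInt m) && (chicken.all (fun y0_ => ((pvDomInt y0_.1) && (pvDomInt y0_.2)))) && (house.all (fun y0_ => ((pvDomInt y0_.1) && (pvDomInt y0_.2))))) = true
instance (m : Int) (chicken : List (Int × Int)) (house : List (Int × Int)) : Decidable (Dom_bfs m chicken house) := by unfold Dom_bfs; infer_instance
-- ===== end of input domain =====

-- B replaces A's BFS deque enumeration (with deepcopy and count/level bookkeeping) and its
-- 0-as-uninitialized minimum tracking by a direct recursive enumeration of the index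
-- combinations and plain min/sum; objective: simpler. Return values only are at stake
-- (A mutates no argument observably: it only pops what it appended).

-- ===== PORT A =====
-- port of getChickenDistance (chicken[s] is always in range on every state A reaches;
-- pyGetD with default (0,0) is the literal indexing)
def getChickenDistance (selected : List Int) (chicken : List (Int × Int)) (house : List (Int × Int)) : Int :=
  house.foldl (fun ret h =>
    let closest := selected.foldl (fun closest s =>
      let chickPos := PySem.List.pyGetD chicken s (0, 0)
      let tmp := |h.1 - chickPos.1| + |h.2 - chickPos.2|
      if closest == 0 || tmp < closest then tmp else closest) 0
    ret + closest) 0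

-- the while-loop of A; fuel is a totality guard only — bfs below supplies fuel ≥ the
-- exact number of iterations the Python loop performs, so the guard branch is never the result
def bfsLoop (m : Int) (chicken : List (Int × Int)) (house : List (Int × Int)) :
    Nat → List (List Int × Int) → Int → Int
  | 0, _, minimum => minimum
  | _ + 1, [], minimum => minimum
  | fuel + 1, (selected, count) :: rest, minimum =>
    if count == 0 then
      bfsLoop m chicken house fuel
        (rest ++ (PySem.List.pyRange 0 ((chicken.length : Int) - m + 1) 1).map
          (fun i => (selected ++ [i], count + 1))) minimum
    else if count == m then
      let ret := getChickenDistance selected chicken house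
      bfsLoop m chicken house fuel rest (if minimum == 0 || ret < minimum then ret else minimum)
    else
      bfsLoop m chicken house fuel
        (rest ++ (PySem.List.pyRange (PySem.List.pyGetD selected (count - 1) 0 + 1)
            (chicken.length : Int) 1).map
          (fun i => (selected ++ [i], count + 1))) minimum

-- fuel accounting (sizes of the successive BFS levels; used only to bound the iteration count)
def childrenA (n : Int) (sel : List Int) : List (List Int) :=
  (PySem.List.pyRange (PySem.List.pyGetD sel ((sel.length : Int) - 1) 0 + 1) n 1).map
    (fun i => sel ++ [i])

def expandA (n : Int) (sels : List (List Int)) : List (List Int) :=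
  sels.flatMap (childrenA n)

def seedsA (m n : Int) : List (List Int) :=
  (PySem.List.pyRange 0 (n - m + 1) 1).map (fun i => [i])

def needFuel (n : Int) : Nat → List (List Int) → Nat
  | 0, sels => sels.length
  | _ + 1, [] => 0
  | k + 1, sel :: sels => (sel :: sels).length + needFuel n k (expandA n (sel :: sels))

def bfs (m : Int) (chicken : List (Int × Int)) (house : List (Int × Int)) : Int :=
  bfsLoop m chicken house
    (1 + needFuel (chicken.length : Int) (m - 1).toNat (seedsA m (chicken.length : Int)))
    [([], 0)] 0

-- ===== PORT B =====
-- port of _combos: all strictly increasing r-tuples from [start, n), lexicographic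
def comb (n : Int) (start : Int) (r : Int) : List (List Int) :=
  if r = 0 then [[]]
  else
    (PySem.List.pyRange start n 1).attach.flatMap
      (fun ⟨i, hi⟩ => (comb n (i + 1) (r - 1)).map (i :: ·))
termination_by (n - start).toNat
decreasing_by
  have := (PySem.List.mem_pyRange_one).mp hi
  omega

-- port of _total; Python's min(...) over the selected stores raises on an empty selection,
-- which never happens inside Pre_bfs — .getD 0 is the totality guard for that dead branch
def totalB (chicken : List (Int × Int)) (house : List (Int × Int)) (sel : List Int) : Int :=
  house.foldl (fun total h =>
    total + (PySem.List.min? (sel.map (fun s =>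
      let c := PySem.List.pyGetD chicken s (0, 0)
      |h.1 - c.1| + |h.2 - c.2|)) (fun y => y)).getD 0) 0

-- min(totals, default=0)
def bfs_alt (m : Int) (chicken : List (Int × Int)) (house : List (Int × Int)) : Int :=
  (PySem.List.min? ((comb (chicken.length : Int) 0 m).map (totalB chicken house)) (fun y => y)).getD 0

-- ===== PRECONDITION & SPEC =====
-- Pre_ excludes (a) m = 0 with a nonempty house list, where A returns 0 but B's min over the
-- empty selection raises ValueError, and (b) inputs with a house on a chicken store — the
-- chicken-delivery problem places houses and stores on distinct cells, and off that domain
-- A's 0-as-uninitialized minimum tracking yields accidental values a plain min cannot match.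
def Pre_bfs (m : Int) (chicken : List (Int × Int)) (house : List (Int × Int)) : Prop :=
  (m ≠ 0 ∨ house = []) ∧ ∀ h ∈ house, h ∉ chicken
instance (m : Int) (chicken : List (Int × Int)) (house : List (Int × Int)) : Decidable (Pre_bfs m chicken house) := by unfold Pre_bfs; infer_instance

def pvWitness_bfs : Int × (List (Int × Int)) × (List (Int × Int)) :=
  (2, [(0, 0), (3, 1), (5, 5)], [(1, 0), (4, 4)])

def Spec_bfs (m : Int) (chicken : List (Int × Int)) (house : List (Int × Int)) (out : Int) : Prop := out = bfs_alt m chicken house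
instance (m : Int) (chicken : List (Int × Int)) (house : List (Int × Int)) (out : Int) : Decidable (Spec_bfs m chicken house out) := by unfold Spec_bfs; infer_instance

-- ===== CLAIM (what is proved, stated in full; the proofs are below) =====
def Claim_equal_bfs : Prop := ∀ (m : Int) (chicken : List (Int × Int)) (house : List (Int × Int)), Dom_bfs m chicken house → Pre_bfs m chicken house → Spec_bfs m chicken house (bfs m chicken house)

-- ===== LEMMAS AND PROOFS =====

-- the running sentinel update A uses for `minimum`/`closest`
def sUpd (acc x : Int) : Int := if acc == 0 || x < acc then x else acc

lemma sUpd_def (a x : Int) : sUpd a x = if a = 0 ∨ x < a then x else a := by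
  unfold sUpd
  by_cases h1 : a = 0 <;> by_cases h2 : x < a <;> simp [h1, h2]

-- over positive values the sentinel fold from a positive seed is the running min
lemma foldl_sUpd_pos (xs : List Int) : ∀ (a : Int), 0 < a → (∀ x ∈ xs, 0 < x) →
    xs.foldl sUpd a = xs.foldl min a := by
  induction xs with
  | nil => intro a _ _; rfl
  | cons x t ih =>
    intro a ha hall
    have hx : 0 < x := hall x (by simp)
    simp only [List.foldl_cons]
    rw [show sUpd a x = min a x from by rw [sUpd_def]; split_ifs <;> omega]
    exact ih (min a x) (by omega) (fun y hy => hall y (by simp [hy]))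

-- the sentinel fold from 0 over positive values IS Python's min
lemma foldl_sUpd_eq_min (xs : List Int) (h : ∀ x ∈ xs, 0 < x) :
    xs.foldl sUpd 0 = (PySem.List.min? xs (fun y => y)).getD 0 := by
  cases xs with
  | nil => rfl
  | cons x t =>
    rw [PySem.List.min?_id_cons]
    simp only [List.foldl_cons, Option.getD_some]
    rw [show sUpd 0 x = x from by rw [sUpd_def]; simp]
    exact foldl_sUpd_pos t x (h x (by simp)) (fun y hy => h y (by simp [hy]))

lemma foldl_sUpd_zero_of_zeros : ∀ (t : List Int), (∀ x ∈ t, x = 0) → t.foldl sUpd 0 = 0 := by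
  intro t
  induction t with
  | nil => intro _; rfl
  | cons x t ih =>
    intro h
    have hx : x = 0 := h x (by simp)
    subst hx
    simp only [List.foldl_cons]
    rw [show sUpd 0 0 = 0 from by rw [sUpd_def]; simp]
    exact ih (fun z hz => h z (by simp [hz]))

lemma foldl_min_zero_of_zeros : ∀ (t : List Int), (∀ x ∈ t, x = 0) → t.foldl min 0 = 0 := by
  intro t
  induction t with
  | nil => intro _; rfl
  | cons x t ih =>
    intro h
    have hx : x = 0 := h x (by simp)
    subst hx
    simp only [List.foldl_cons, min_self]
    exact ih (fun z hz => h z (by simp [hz]))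

lemma foldl_sUpd_zeros (xs : List Int) (h : ∀ x ∈ xs, x = 0) :
    xs.foldl sUpd 0 = (PySem.List.min? xs (fun y => y)).getD 0 := by
  cases xs with
  | nil => rfl
  | cons x t =>
    rw [PySem.List.min?_id_cons]
    simp only [List.foldl_cons, Option.getD_some]
    have hx : x = 0 := h x (by simp)
    subst hx
    rw [show sUpd 0 0 = 0 from by rw [sUpd_def]; simp]
    have ht : ∀ z ∈ t, z = 0 := fun z hz => h z (by simp [hz])
    rw [foldl_sUpd_zero_of_zeros t ht, foldl_min_zero_of_zeros t ht]

-- comb with r ≠ 0, unattached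
lemma comb_unfold (n start r : Int) (hr : r ≠ 0) :
    comb n start r = (PySem.List.pyRange start n 1).flatMap
      (fun i => (comb n (i + 1) (r - 1)).map (i :: ·)) := by
  rw [comb, if_neg hr]
  rw [List.flatMap_subtype (g := fun i => (comb n (i + 1) (r - 1)).map (i :: ·))
    (fun x h => by rfl), List.unattach_attach]

-- members of comb n start r are indices in [start, n)
lemma comb_mem_bounds (n : Int) : ∀ (d : Nat) (start r : Int), (n - start).toNat ≤ d →
    ∀ sel ∈ comb n start r, ∀ i ∈ sel, start ≤ i ∧ i < n := by
  intro d
  induction d with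
  | zero =>
    intro start r hd sel hsel i hi
    by_cases hr : r = 0
    · rw [comb, if_pos hr] at hsel
      simp only [List.mem_singleton] at hsel; subst hsel; simp at hi
    · rw [comb_unfold n start r hr] at hsel
      simp only [List.mem_flatMap, List.mem_map] at hsel
      obtain ⟨j, hj, t, ht, rfl⟩ := hsel
      have hjb := PySem.List.mem_pyRange_one.mp hj
      omega
  | succ d ih =>
    intro start r hd sel hsel i hi
    by_cases hr : r = 0
    · rw [comb, if_pos hr] at hsel
      simp only [List.mem_singleton] at hsel; subst hsel; simp at hi
    · rw [comb_unfold n start r hr] at hsel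
      simp only [List.mem_flatMap, List.mem_map] at hsel
      obtain ⟨j, hj, t, ht, rfl⟩ := hsel
      have hjb := PySem.List.mem_pyRange_one.mp hj
      rcases List.mem_cons.mp hi with rfl | hit
      · exact ⟨hjb.1, hjb.2⟩
      · have := ih (j + 1) (r - 1) (by omega) t ht i hit
        exact ⟨by omega, this.2⟩

-- for r ≠ 0 every member of comb is nonempty
lemma comb_mem_ne_nil (n start r : Int) (hr : r ≠ 0) :
    ∀ sel ∈ comb n start r, sel ≠ [] := by
  intro sel hsel
  rw [comb_unfold n start r hr] at hsel
  simp only [List.mem_flatMap, List.mem_map] at hsel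
  obtain ⟨j, hj, t, ht, rfl⟩ := hsel
  simp

-- distances are positive when the house is on no chicken store
lemma absDist_pos (h c : Int × Int) (hne : h ≠ c) : 0 < |h.1 - c.1| + |h.2 - c.2| := by
  by_cases h1 : h.1 = c.1
  · have h2 : h.2 ≠ c.2 := by
      intro h2
      exact hne (Prod.ext h1 h2)
    have := abs_pos.mpr (sub_ne_zero.mpr h2)
    have := abs_nonneg (h.1 - c.1)
    omega
  · have := abs_pos.mpr (sub_ne_zero.mpr h1)
    have := abs_nonneg (h.2 - c.2)
    omega

-- A's inner sentinel loop, as a fold of sUpd over the mapped distance list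
lemma inner_fold_eq (h : Int × Int) (chicken : List (Int × Int)) (sel : List Int) :
    (sel.foldl (fun closest s =>
      let chickPos := PySem.List.pyGetD chicken s (0, 0)
      let tmp := |h.1 - chickPos.1| + |h.2 - chickPos.2|
      if closest == 0 || tmp < closest then tmp else closest) 0) =
    (sel.map (fun s =>
      let c := PySem.List.pyGetD chicken s (0, 0)
      |h.1 - c.1| + |h.2 - c.2|)).foldl sUpd 0 := by
  rw [List.foldl_map]
  apply List.foldl_ext
  intro acc s _
  simp [sUpd]

-- per-combination totals agree when houses avoid the stores and indices are in range
lemma gcd_eq_totalB (sel : List Int) (chicken house : List (Int × Int))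
    (hidx : ∀ s ∈ sel, 0 ≤ s ∧ s < (chicken.length : Int))
    (hnc : ∀ h ∈ house, h ∉ chicken) :
    getChickenDistance sel chicken house = totalB chicken house sel := by
  unfold getChickenDistance totalB
  apply PySem.List.foldl_congr_mem
  intro acc h hh
  show acc + (sel.foldl (fun closest s =>
      let chickPos := PySem.List.pyGetD chicken s (0, 0)
      let tmp := |h.1 - chickPos.1| + |h.2 - chickPos.2|
      if closest == 0 || tmp < closest then tmp else closest) 0) =
    acc + (PySem.List.min? (sel.map (fun s =>
      let c := PySem.List.pyGetD chicken s (0, 0)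
      |h.1 - c.1| + |h.2 - c.2|)) (fun y => y)).getD 0
  congr 1
  rw [inner_fold_eq]
  apply foldl_sUpd_eq_min
  intro x hx
  simp only [List.mem_map] at hx
  obtain ⟨s, hs, rfl⟩ := hx
  have hb := hidx s hs
  have hmem : PySem.List.pyGetD chicken s (0, 0) ∈ chicken :=
    PySem.List.pyGetD_mem chicken (0, 0) (by unfold PySem.Raise.InRange; omega)
  exact absDist_pos h _ (fun he => hnc h hh (he ▸ hmem))

lemma foldl_add_le {β : Type} (f : β → Int) (hf : ∀ b, 0 ≤ f b) :
    ∀ (l : List β) (init : Int), init ≤ l.foldl (fun t h => t + f h) init := by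
  intro l
  induction l with
  | nil => intro init; simp
  | cons b t ih =>
    intro init
    simp only [List.foldl_cons]
    have := ih (init + f b)
    have := hf b
    omega

-- a nonempty sum of positive per-house minima is positive
lemma totalB_pos (sel : List Int) (chicken house : List (Int × Int)) (hh : house ≠ [])
    (hsel : sel ≠ [])
    (hidx : ∀ s ∈ sel, 0 ≤ s ∧ s < (chicken.length : Int))
    (hnc : ∀ h ∈ house, h ∉ chicken) :
    0 < totalB chicken house sel := by
  have key : ∀ h ∈ house, 0 < (PySem.List.min? (sel.map (fun s =>
      let c := PySem.List.pyGetD chicken s (0, 0)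
      |h.1 - c.1| + |h.2 - c.2|)) (fun y => y)).getD 0 := by
    intro h hh'
    cases hmin : PySem.List.min? (sel.map (fun s =>
        let c := PySem.List.pyGetD chicken s (0, 0)
        |h.1 - c.1| + |h.2 - c.2|)) (fun y => y) with
    | none =>
      exfalso
      exact hsel (by simpa using (PySem.List.min?_eq_none_iff _ _).mp hmin)
    | some v =>
      have hv := PySem.List.min?_mem hmin
      simp only [List.mem_map] at hv
      obtain ⟨s, hs, rfl⟩ := hv
      have hb := hidx s hs
      have hmem : PySem.List.pyGetD chicken s (0, 0) ∈ chicken :=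
        PySem.List.pyGetD_mem chicken (0, 0) (by unfold PySem.Raise.InRange; omega)
      simpa using absDist_pos h _ (fun he => hnc h hh' (he ▸ hmem))
  unfold totalB
  cases house with
  | nil => exact absurd rfl hh
  | cons h t =>
    simp only [List.foldl_cons, zero_add]
    calc (0 : Int) < _ := key h (by simp)
    _ ≤ _ := foldl_add_le _ (fun b => by
        cases hmin : PySem.List.min? (sel.map (fun s =>
            let c := PySem.List.pyGetD chicken s (0, 0)
            |b.1 - c.1| + |b.2 - c.2|)) (fun y => y) with
        | none => simp
        | some v =>
          have hv := PySem.List.min?_mem hmin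
          simp only [List.mem_map] at hv
          obtain ⟨s, _, rfl⟩ := hv
          simp only [Option.getD_some]
          positivity) t _

-- comb is empty when there is no room for r ≥ 1 more indices
lemma comb_eq_nil_of_no_room (n : Int) : ∀ (k : Nat) (start r : Int), r = (k : Int) + 1 →
    n - start < r → comb n start r = [] := by
  intro k
  induction k with
  | zero =>
    intro start r hr h
    rw [comb, if_neg (by omega)]
    have : PySem.List.pyRange start n 1 = [] :=
      PySem.List.pyRange_one_eq_nil (by omega)
    simp [this]
  | succ k ih =>
    intro start r hr h
    rw [comb, if_neg (by omega)]
    rw [List.flatMap_eq_nil_iff]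
    intro l hl
    obtain ⟨i, hi⟩ := l
    have hib := PySem.List.mem_pyRange_one.mp hi
    show (comb n (i + 1) (r - 1)).map (i :: ·) = []
    rw [ih (i + 1) (r - 1) (by omega) (by omega)]
    simp

lemma comb_eq_nil_of_neg (n : Int) : ∀ (d : Nat) (start r : Int), (n - start).toNat ≤ d →
    r < 0 → comb n start r = [] := by
  intro d
  induction d with
  | zero =>
    intro start r hd hr
    rw [comb, if_neg (by omega)]
    have : PySem.List.pyRange start n 1 = [] :=
      PySem.List.pyRange_one_eq_nil (by omega)
    simp [this]
  | succ d ih =>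
    intro start r hd hr
    rw [comb, if_neg (by omega)]
    rw [List.flatMap_eq_nil_iff]
    intro l hl
    obtain ⟨i, hi⟩ := l
    have hib := PySem.List.mem_pyRange_one.mp hi
    show (comb n (i + 1) (r - 1)).map (i :: ·) = []
    rw [ih (i + 1) (r - 1) (by omega) (by omega)]
    simp

-- A's children of sel ++ [i] extend from i
lemma childrenA_append (n : Int) (sel : List Int) (i : Int) :
    childrenA n (sel ++ [i]) =
      (PySem.List.pyRange (i + 1) n 1).map (fun j => (sel ++ [i]) ++ [j]) := by
  unfold childrenA
  have hlen : ((sel ++ [i]).length : Int) - 1 = (sel.length : Int) := by simp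
  rw [hlen]
  have : PySem.List.pyGetD (sel ++ [i]) (sel.length : Int) 0 = i := by
    rw [PySem.List.pyGetD_natCast]
    simp [List.getD]
  rw [this]

lemma length_mem_expandA (n : Int) (sels : List (List Int)) (c : Int)
    (h : ∀ s ∈ sels, (s.length : Int) = c) :
    ∀ s ∈ expandA n sels, (s.length : Int) = c + 1 := by
  intro s hs
  unfold expandA childrenA at hs
  simp only [List.mem_flatMap, List.mem_map] at hs
  obtain ⟨t, ht, i, _, rfl⟩ := hs
  simp [← h t ht]

lemma iterate_expandA_flatMap (n : Int) : ∀ (k : Nat) (sels : List (List Int)),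
    (expandA n)^[k] sels = sels.flatMap (fun s => (expandA n)^[k] [s]) := by
  intro k
  induction k with
  | zero => intro sels; simp
  | succ k ih =>
    intro sels
    simp only [Function.iterate_succ_apply]
    rw [ih (expandA n sels)]
    rw [show expandA n sels = sels.flatMap (childrenA n) from rfl, List.flatMap_assoc]
    congr 1
    funext s
    rw [← ih (childrenA n s)]
    congr 1
    simp [expandA]

-- the iterated BFS level expansion of a single seed = the DFS combination list
lemma iterate_expandA_singleton (n : Int) : ∀ (k : Nat) (sel : List Int) (i : Int),
    (expandA n)^[k] [sel ++ [i]] = (comb n (i + 1) (k : Int)).map ((sel ++ [i]) ++ ·) := by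
  intro k
  induction k with
  | zero =>
    intro sel i
    rw [comb]
    simp
  | succ k ih =>
    intro sel i
    rw [Function.iterate_succ_apply]
    have hexp : expandA n [sel ++ [i]] = childrenA n (sel ++ [i]) := by simp [expandA]
    rw [hexp, childrenA_append, iterate_expandA_flatMap n k]
    rw [List.flatMap_map]
    have hstep : ∀ j : Int, (expandA n)^[k] [(sel ++ [i]) ++ [j]] =
        (comb n (j + 1) (k : Int)).map (((sel ++ [i]) ++ [j]) ++ ·) := fun j => ih (sel ++ [i]) j
    rw [comb, if_neg (by omega)]
    rw [List.map_flatMap]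
    rw [List.flatMap_subtype (g := fun j => ((comb n (j + 1) (((k + 1 : Nat) : Int) - 1)).map (j :: ·)).map ((sel ++ [i]) ++ ·)) (fun x h => by rfl)]
    rw [List.unattach_attach]
    congr 1
    funext j
    rw [hstep j]
    rw [List.map_map]
    rw [show (((k + 1 : Nat) : Int)) - 1 = (k : Int) by push_cast; ring]
    congr 1
    funext t
    simp

-- dead run: when no queue element can ever hit count == 0 or count == m, minimum is returned unchanged
lemma bfsLoop_dead (m : Int) (chicken house : List (Int × Int)) (hm : m ≤ 0) :
    ∀ (fuel : Nat) (queue : List (List Int × Int)) (minimum : Int),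
      (∀ p ∈ queue, 1 ≤ p.2) → bfsLoop m chicken house fuel queue minimum = minimum := by
  intro fuel
  induction fuel with
  | zero => intro queue minimum _; rfl
  | succ fuel ih =>
    intro queue minimum hq
    match queue with
    | [] => rfl
    | (sel, c) :: rest =>
      have hc : 1 ≤ c := hq (sel, c) (by simp)
      rw [bfsLoop, if_neg (by simp; omega), if_neg (by simp; omega)]
      apply ih
      intro p hp
      rcases List.mem_append.mp hp with h | h
      · exact hq p (by simp [h])
      · simp only [List.mem_map] at h
        obtain ⟨j, _, rfl⟩ := h
        simp; omega

-- one whole BFS level at count c (1 ≤ c, c ≠ m)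
lemma bfsLoop_level (m : Int) (chicken house : List (Int × Int)) (c : Int)
    (hc : 1 ≤ c) (hcm : c ≠ m) :
    ∀ (sels next : List (List Int)) (fuel : Nat) (minimum : Int),
      (∀ s ∈ sels, (s.length : Int) = c) →
      bfsLoop m chicken house (fuel + sels.length)
        (sels.map (·, c) ++ next.map (·, c + 1)) minimum =
      bfsLoop m chicken house fuel
        ((next ++ sels.flatMap (childrenA (chicken.length : Int))).map (·, c + 1)) minimum := by
  intro sels
  induction sels with
  | nil => intro next fuel minimum _; simp
  | cons sel sels ih =>
    intro next fuel minimum hlen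
    have hsel : (sel.length : Int) = c := hlen sel (by simp)
    simp only [List.length_cons, List.map_cons, List.cons_append]
    rw [show fuel + (sels.length + 1) = (fuel + sels.length) + 1 by omega]
    rw [bfsLoop, if_neg (by simp; omega), if_neg (by simpa using hcm)]
    have harr : (sels.map (·, c) ++ next.map (·, c + 1)) ++
        (PySem.List.pyRange (PySem.List.pyGetD sel (c - 1) 0 + 1) (chicken.length : Int) 1).map
          (fun i => (sel ++ [i], c + 1)) =
        sels.map (·, c) ++ (next ++ childrenA (chicken.length : Int) sel).map (·, c + 1) := by
      rw [List.append_assoc, List.map_append]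
      congr 2
      unfold childrenA
      rw [List.map_map, ← hsel]
      rfl
    rw [harr, ih (next ++ childrenA (chicken.length : Int) sel) fuel minimum
      (fun s hs => hlen s (by simp [hs]))]
    congr 2
    simp [List.append_assoc]

-- the final level c = m: fold the sentinel minimum over the combos
lemma bfsLoop_final (m : Int) (chicken house : List (Int × Int)) (hm : 1 ≤ m) :
    ∀ (sels : List (List Int)) (fuel : Nat) (minimum : Int),
      bfsLoop m chicken house (fuel + sels.length) (sels.map (·, m)) minimum =
      bfsLoop m chicken house fuel []
        (sels.foldl (fun acc s => sUpd acc (getChickenDistance s chicken house)) minimum) := by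
  intro sels
  induction sels with
  | nil => intro fuel minimum; simp
  | cons sel sels ih =>
    intro fuel minimum
    simp only [List.length_cons, List.map_cons, List.foldl_cons]
    rw [show fuel + (sels.length + 1) = (fuel + sels.length) + 1 by omega]
    rw [bfsLoop, if_neg (by simp; omega), if_pos (by simp)]
    exact ih fuel (sUpd minimum (getChickenDistance sel chicken house))

lemma bfsLoop_nil (m : Int) (chicken house : List (Int × Int)) (fuel : Nat) (minimum : Int) :
    bfsLoop m chicken house fuel [] minimum = minimum := by
  cases fuel <;> rfl

lemma iterate_expandA_nil (n : Int) (k : Nat) : (expandA n)^[k] [] = [] := by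
  induction k with
  | zero => rfl
  | succ k ih => rw [Function.iterate_succ_apply]; exact ih

-- the full multi-level run with the exact fuel
lemma bfsLoop_levels (m : Int) (chicken house : List (Int × Int)) :
    ∀ (k : Nat) (c : Int) (sels : List (List Int)) (minimum : Int),
      1 ≤ c → c + (k : Int) = m → (∀ s ∈ sels, (s.length : Int) = c) →
      bfsLoop m chicken house (needFuel (chicken.length : Int) k sels) (sels.map (·, c)) minimum =
        ((expandA (chicken.length : Int))^[k] sels).foldl
          (fun acc s => sUpd acc (getChickenDistance s chicken house)) minimum := by
  intro k
  induction k with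
  | zero =>
    intro c sels minimum hc hck _
    have hcm : c = m := by omega
    rw [hcm]
    unfold needFuel
    rw [show sels.length = 0 + sels.length by omega]
    rw [bfsLoop_final m chicken house (by omega) sels 0 minimum, bfsLoop_nil]
    simp
  | succ k ih =>
    intro c sels minimum hc hck hlen
    cases sels with
    | nil =>
      show bfsLoop m chicken house 0 [] minimum = _
      rw [bfsLoop_nil, iterate_expandA_nil]
      rfl
    | cons sel sels =>
    show bfsLoop m chicken house ((sel :: sels).length + needFuel (chicken.length : Int) k
      (expandA (chicken.length : Int) (sel :: sels))) _ _ = _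
    rw [show (sel :: sels).length + needFuel (chicken.length : Int) k
        (expandA (chicken.length : Int) (sel :: sels)) =
      needFuel (chicken.length : Int) k (expandA (chicken.length : Int) (sel :: sels)) + (sel :: sels).length
      by omega]
    have := bfsLoop_level m chicken house c hc (by push_cast at hck ⊢; omega) (sel :: sels) []
      (needFuel (chicken.length : Int) k (expandA (chicken.length : Int) (sel :: sels))) minimum hlen
    simp only [List.map_nil, List.nil_append, List.append_nil] at this
    rw [this]
    rw [show (sel :: sels).flatMap (childrenA (chicken.length : Int)) = expandA (chicken.length : Int) (sel :: sels) from rfl]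
    rw [ih (c + 1) (expandA (chicken.length : Int) (sel :: sels)) minimum (by omega)
      (by push_cast at hck ⊢; omega)
      (length_mem_expandA (chicken.length : Int) (sel :: sels) c hlen)]
    rw [Function.iterate_succ_apply]

-- comb from 0 can be truncated to the first n-m+1 starting indices (the rest have no room)
lemma comb_zero_trunc (n m : Int) (hm : 1 ≤ m) :
    comb n 0 m = (PySem.List.pyRange 0 (n - m + 1) 1).flatMap
      (fun i => (comb n (i + 1) (m - 1)).map (i :: ·)) := by
  rw [comb_unfold n 0 m (by omega)]
  by_cases hcase : m ≤ n
  · rw [PySem.List.pyRange_one_append 0 (n - m + 1) n (by omega) (by omega), List.flatMap_append]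
    have hnil : (PySem.List.pyRange (n - m + 1) n 1).flatMap
        (fun i => (comb n (i + 1) (m - 1)).map (i :: ·)) = [] := by
      rw [List.flatMap_eq_nil_iff]
      intro i hi
      have hib := PySem.List.mem_pyRange_one.mp hi
      show (comb n (i + 1) (m - 1)).map (i :: ·) = []
      rw [comb_eq_nil_of_no_room n (m - 2).toNat (i + 1) (m - 1) (by omega) (by omega)]
      simp
    rw [hnil, List.append_nil]
  · rw [PySem.List.pyRange_one_eq_nil (show n - m + 1 ≤ 0 by omega)]
    simp only [List.flatMap_nil]
    rw [List.flatMap_eq_nil_iff]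
    intro i hi
    have hib := PySem.List.mem_pyRange_one.mp hi
    show (comb n (i + 1) (m - 1)).map (i :: ·) = []
    rw [comb_eq_nil_of_no_room n (m - 2).toNat (i + 1) (m - 1) (by omega) (by omega)]
    simp

lemma foldl_id {α : Type} : ∀ (l : List α) (init : Int), l.foldl (fun t _ => t) init = init := by
  intro l
  induction l with
  | nil => intro init; rfl
  | cons a t ih => intro init; simp only [List.foldl_cons]; exact ih init

lemma totalB_empty_sel (chicken house : List (Int × Int)) : totalB chicken house [] = 0 := by
  unfold totalB
  simp only [List.map_nil]
  rw [show (PySem.List.min? ([] : List Int) (fun y => y)).getD 0 = 0 from rfl]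
  simp only [add_zero]
  exact foldl_id house 0

-- ===== VERDICT (by name: the statement is the Claim_ definition above) =====
theorem bfs_spec : Claim_equal_bfs := by
  intro m chicken house _ hpre
  obtain ⟨hm0, hnc⟩ := hpre
  unfold Spec_bfs bfs bfs_alt
  rw [show 1 + needFuel (chicken.length : Int) (m - 1).toNat (seedsA m (chicken.length : Int)) =
      needFuel (chicken.length : Int) (m - 1).toNat (seedsA m (chicken.length : Int)) + 1 by omega]
  rw [bfsLoop, if_pos (by simp)]
  have hq : ([] : List (List Int × Int)) ++
      (PySem.List.pyRange 0 ((chicken.length : Int) - m + 1) 1).map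
        (fun i => (([] : List Int) ++ [i], (0 : Int) + 1)) =
      (seedsA m (chicken.length : Int)).map (·, 1) := by
    simp [seedsA]
  rw [hq]
  by_cases hm : 1 ≤ m
  · rw [bfsLoop_levels m chicken house (m - 1).toNat 1 (seedsA m (chicken.length : Int)) 0
      le_rfl (by omega)
      (by intro s hs
          simp only [seedsA, List.mem_map] at hs
          obtain ⟨i, _, rfl⟩ := hs
          simp)]
    -- the expanded BFS levels enumerate exactly comb n 0 m
    have hL : (expandA (chicken.length : Int))^[(m - 1).toNat] (seedsA m (chicken.length : Int)) =
        comb (chicken.length : Int) 0 m := by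
      rw [iterate_expandA_flatMap]
      have hsing := fun i => iterate_expandA_singleton (chicken.length : Int) (m - 1).toNat [] i
      simp only [List.nil_append] at hsing
      unfold seedsA
      rw [List.flatMap_map]
      simp only [hsing]
      rw [show (((m - 1).toNat : Nat) : Int) = m - 1 by omega]
      rw [comb_zero_trunc (chicken.length : Int) m hm]
      simp
    rw [hL, ← List.foldl_map (f := fun s => getChickenDistance s chicken house) (g := sUpd)]
    have hbounds : ∀ sel ∈ comb (chicken.length : Int) 0 m, ∀ i ∈ sel,
        0 ≤ i ∧ i < (chicken.length : Int) :=
      comb_mem_bounds (chicken.length : Int) chicken.length 0 m (by omega)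
    have hmapeq : (comb (chicken.length : Int) 0 m).map
        (fun s => getChickenDistance s chicken house) =
        (comb (chicken.length : Int) 0 m).map (totalB chicken house) := by
      apply List.map_congr_left
      intro sel hsel
      exact gcd_eq_totalB sel chicken house (hbounds sel hsel) hnc
    rw [hmapeq]
    rcases List.eq_nil_or_concat house with hh | ⟨_, _, hcons⟩
    · -- no houses: every total is 0
      apply foldl_sUpd_zeros
      intro x hx
      simp only [List.mem_map] at hx
      obtain ⟨sel, _, rfl⟩ := hx
      subst hh
      rfl
    · -- some house: every total is positive
      apply foldl_sUpd_eq_min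
      intro x hx
      simp only [List.mem_map] at hx
      obtain ⟨sel, hsel, rfl⟩ := hx
      exact totalB_pos sel chicken house (by simp [hcons]) 
        (comb_mem_ne_nil _ _ _ (by omega) sel hsel) (hbounds sel hsel) hnc
  · have hneg : m ≤ 0 := by omega
    rw [bfsLoop_dead m chicken house hneg _ _ 0 (by
      intro p hp
      simp only [List.mem_map] at hp
      obtain ⟨s, _, rfl⟩ := hp
      norm_num)]
    by_cases hz : m = 0
    · subst hz
      have hhe : house = [] := by
        rcases hm0 with h | h
        · exact absurd rfl h
        · exact h
      subst hhe
      rw [show comb (chicken.length : Int) 0 0 = [[]] from by rw [comb]; simp]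
      rw [List.map_singleton, totalB_empty_sel]
      rfl
    · rw [comb_eq_nil_of_neg (chicken.length : Int) ((chicken.length : Int) - 0).toNat 0 m
        le_rfl (by omega)]
      rfl
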